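-- pv_equiv track=rewrite | github.com/AIIntegrationLab/EV-Core | scripts/evcore_validate.py | _coerce_intent
-- ===== SOURCE A (Python) =====
-- from typing import Any, Dict, List
--
-- INTENTS_ALLOWED = {
--     "greeting", "question", "command", "unknown",
--     "tool_time", "tool_date", "tool_timer", "tool_calc",
--     "tool_clarify", "tool_action", "tool_memory",
-- }
--
-- def _coerce_intent(raw_intent: Any) -> str:
--     """
--     Models sometimes output a pipe list like 'greeting|question|command|unknown'.
--     We coerce it into a single allowed intent deterministically.
--     """
--     s = str(raw_intent if raw_intent is not None else "unknown").strip()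
--
--     # If it contains pipes, pick the first allowed token in order of appearance
--     if "|" in s:
--         for part in (p.strip() for p in s.split("|")):
--             if part in INTENTS_ALLOWED:
--                 return part
--         return "unknown"
--
--     return s if s in INTENTS_ALLOWED else "unknown"
-- ===== SOURCE B (Python) =====
-- INTENTS_ALLOWED = {
--     "greeting", "question", "command", "unknown",
--     "tool_time", "tool_date", "tool_timer", "tool_calc",
--     "tool_clarify", "tool_action", "tool_memory",
-- }
--
-- _WS = " \t\n\r\x0b\x0c"
--
-- def _coerce_intent(raw_intent):
--     # Single character-level state machine: no split(), no per-part strip().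
--     # `token` is the whitespace-trimmed text of the current pipe-separated
--     # field so far; `pending` buffers interior whitespace that is flushed
--     # only when another non-space character follows (so trailing spaces of a
--     # field are never kept).
--     s = str(raw_intent if raw_intent is not None else "unknown").strip()
--     token = ""
--     pending = ""
--     for ch in s:
--         if ch == "|":
--             if token in INTENTS_ALLOWED:
--                 return token
--             token = ""
--             pending = ""
--         elif ch in _WS:
--             if token:
--                 pending += ch
--         else:
--             token += pending + ch
--             pending = ""
--     return token if token in INTENTS_ALLOWED else "unknown"
-- ===== Notes on version B (the rewrite author's own statement) =====
-- stated objective: alternative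
-- what changed: Replaces A's split('|') plus per-part strip() scan (and its separate no-pipe return path) with a single character-level state machine that trims each pipe-separated field on the fly via a token/pending-whitespace accumulator, checking membership at each '|' and at the end.
import Mathlib
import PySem

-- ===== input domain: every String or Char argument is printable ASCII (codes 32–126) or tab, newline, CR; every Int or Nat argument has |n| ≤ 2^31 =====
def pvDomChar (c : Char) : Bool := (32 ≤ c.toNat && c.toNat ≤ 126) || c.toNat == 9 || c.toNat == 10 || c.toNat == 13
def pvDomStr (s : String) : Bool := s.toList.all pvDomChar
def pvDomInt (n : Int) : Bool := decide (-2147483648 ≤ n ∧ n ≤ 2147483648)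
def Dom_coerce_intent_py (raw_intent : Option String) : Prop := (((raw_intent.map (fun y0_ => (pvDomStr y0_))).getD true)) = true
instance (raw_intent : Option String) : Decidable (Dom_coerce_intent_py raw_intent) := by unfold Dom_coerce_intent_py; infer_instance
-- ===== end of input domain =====

-- B replaces A's split('|')-and-strip-each-part scan by a single character-level
-- state machine that trims each field on the fly (objective: alternative).

-- module-level constant INTENTS_ALLOWED (a Python set; only membership is used)
def INTENTS_ALLOWED_py : PySem.Set String :=
  PySem.Set.ofList ["greeting", "question", "command", "unknown",
    "tool_time", "tool_date", "tool_timer", "tool_calc",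
    "tool_clarify", "tool_action", "tool_memory"]

-- ===== PORT A =====
-- A's for-loop over the stripped parts of s.split("|"), returning the first allowed one
def coerceLoopA : List String → String
  | [] => "unknown"
  | q :: rest =>
    let part := PySem.Str.strip q
    if PySem.Set.contains INTENTS_ALLOWED_py part then part else coerceLoopA rest

def coerce_intent_py (raw_intent : Option String) : String :=
  let s := PySem.Str.strip (raw_intent.getD "unknown")
  if PySem.Str.isIn "|" s then
    coerceLoopA ((PySem.Str.split? s "|").getD [])   -- sep "|" is nonempty, so split? is never none
  else
    if PySem.Set.contains INTENTS_ALLOWED_py s then s else "unknown"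

-- ===== PORT B =====
-- the literal whitespace string _WS of Source B
def pvWS : List Char := [' ', '\t', '\n', '\r', '\x0b', '\x0c']

-- Source B's for-loop: state (token, pending) over the characters of s
def coerceScan : List Char → List Char → List Char → String
  | [], token, _pending =>
    if PySem.Set.contains INTENTS_ALLOWED_py (String.ofList token) then String.ofList token
    else "unknown"
  | c :: rest, token, pending =>
    if c = '|' then
      if PySem.Set.contains INTENTS_ALLOWED_py (String.ofList token) then String.ofList token
      else coerceScan rest [] []
    else if c ∈ pvWS then
      if token = [] then coerceScan rest token pending
      else coerceScan rest token (pending ++ [c])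
    else coerceScan rest (token ++ pending ++ [c]) []

def coerce_intent_py_alt (raw_intent : Option String) : String :=
  let s := PySem.Str.strip (raw_intent.getD "unknown")
  coerceScan s.toList [] []

-- ===== PRECONDITION & SPEC =====
def Spec_coerce_intent_py (raw_intent : Option String) (out : String) : Prop := out = coerce_intent_py_alt raw_intent
instance (raw_intent : Option String) (out : String) : Decidable (Spec_coerce_intent_py raw_intent out) := by unfold Spec_coerce_intent_py; infer_instance

-- ===== CLAIM (what is proved, stated in full; the proofs are below) =====
def Claim_equal_coerce_intent_py : Prop := ∀ (raw_intent : Option String), Dom_coerce_intent_py raw_intent → Spec_coerce_intent_py raw_intent (coerce_intent_py raw_intent)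

-- ===== LEMMAS AND PROOFS =====

-- on domain characters, membership in Source B's _WS agrees with Python's str.strip whitespace test
theorem mem_pvWS_iff_isspace (c : Char) (h : pvDomChar c = true) :
    (c ∈ pvWS) ↔ PySem.Chars.isspace c = true := by
  have hh : (32 ≤ c.toNat ∧ c.toNat ≤ 126) ∨ c.toNat = 9 ∨ c.toNat = 10 ∨ c.toNat = 13 := by
    simp [pvDomChar] at h; tauto
  have hofn : Char.ofNat c.toNat = c := Char.ofNat_toNat c
  constructor
  · intro hm
    simp [pvWS] at hm
    rcases hm with h1|h1|h1|h1|h1|h1 <;> subst h1 <;> decide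
  · intro hs
    simp [PySem.Chars.isspace] at hs
    have hn : c.toNat = 32 ∨ c.toNat = 9 ∨ c.toNat = 10 ∨ c.toNat = 13 := by omega
    simp [pvWS]
    rcases hn with h1|h1|h1|h1 <;> rw [← hofn, h1] <;> decide

-- dropWhile is idempotent
theorem dropWhile_idem {α : Type} (p : α → Bool) (l : List α) :
    List.dropWhile p (List.dropWhile p l) = List.dropWhile p l := by
  induction l with
  | nil => simp
  | cons a t ih =>
    by_cases h : p a = true
    · simpa [h] using ih
    · simp [h]

theorem chars_rstrip_idem (l : List Char) :
    PySem.Chars.rstrip (PySem.Chars.rstrip l) = PySem.Chars.rstrip l := by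
  simp [PySem.Chars.rstrip, dropWhile_idem]

theorem chars_lstrip_rstrip_lstrip (l : List Char) :
    PySem.Chars.lstrip (PySem.Chars.rstrip (PySem.Chars.lstrip l))
      = PySem.Chars.rstrip (PySem.Chars.lstrip l) := by
  unfold PySem.Chars.lstrip PySem.Chars.rstrip
  set p := PySem.Chars.isspace
  cases hd : List.dropWhile p l with
  | nil => simp
  | cons c t =>
    have hc : p c = false := by
      have := List.head?_dropWhile_not p l
      rw [hd] at this; simpa using this
    have h1 : List.dropWhile p (c :: t).reverse <:+ (c :: t).reverse :=
      List.dropWhile_suffix p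
    have hpre : (List.dropWhile p (c :: t).reverse).reverse <+: (c :: t) := by
      have := List.reverse_prefix.mpr h1
      simpa using this
    rcases hpre with ⟨u, hu⟩
    cases he : (List.dropWhile p (c :: t).reverse).reverse with
    | nil => simp
    | cons d v =>
      have : d = c := by
        rw [he] at hu
        cases hu; rfl
      subst this
      simp [hc]

theorem chars_strip_idem (l : List Char) :
    PySem.Chars.strip (PySem.Chars.strip l) = PySem.Chars.strip l := by
  unfold PySem.Chars.strip
  rw [chars_lstrip_rstrip_lstrip, chars_rstrip_idem]

-- rstrip past a non-space character
theorem rstrip_append_cons (p : List Char) (c : Char) (m : List Char)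
    (hc : PySem.Chars.isspace c = false) :
    PySem.Chars.rstrip (p ++ c :: m) = p ++ c :: PySem.Chars.rstrip m := by
  unfold PySem.Chars.rstrip
  rw [List.reverse_append, List.reverse_cons]
  rw [List.append_assoc, List.dropWhile_append]
  by_cases he : (List.dropWhile PySem.Chars.isspace m.reverse).isEmpty = true
  · simp only [List.isEmpty_iff] at he
    simp [he, hc]
  · simp [he]

-- rstrip of an all-space list is empty
theorem rstrip_all_space (p : List Char) (hp : ∀ c ∈ p, PySem.Chars.isspace c = true) :
    PySem.Chars.rstrip p = [] := by
  unfold PySem.Chars.rstrip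
  rw [List.dropWhile_eq_nil_iff.mpr (fun c hcm => hp c (List.mem_reverse.mp hcm))]
  rfl

-- characters of strip l come from l
theorem mem_of_mem_strip (l : List Char) (c : Char) (h : c ∈ PySem.Chars.strip l) : c ∈ l := by
  unfold PySem.Chars.strip PySem.Chars.rstrip PySem.Chars.lstrip at h
  have h1 := (List.dropWhile_sublist (l := (List.dropWhile PySem.Chars.isspace l).reverse) PySem.Chars.isspace).mem (List.mem_reverse.mp h)
  exact (List.dropWhile_sublist PySem.Chars.isspace).mem (List.mem_reverse.mp h1)

-- the simple recursive splitter mySplit, proved equal to PySem's splitOn on separator "|"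
def consHead (x : List Char) : List (List Char) → List (List Char)
  | [] => [x]
  | h :: r => (x ++ h) :: r

def mySplit : List Char → List (List Char)
  | [] => [[]]
  | c :: t => if c = '|' then [] :: mySplit t else consHead [c] (mySplit t)

theorem mySplit_ne_nil (l : List Char) : mySplit l ≠ [] := by
  cases l with
  | nil => simp [mySplit]
  | cons c t =>
    simp only [mySplit]
    split
    · simp
    · cases h : mySplit t <;> simp [consHead]

theorem consHead_consHead (x y : List Char) (ps : List (List Char)) :
    consHead x (consHead y ps) = consHead (x ++ y) ps := by
  cases ps <;> simp [consHead]

theorem splitOn_go_eq (l : List Char) : ∀ (fuel : Nat) (cur : List Char) (acc : List (List Char)),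
    l.length ≤ fuel →
    PySem.Chars.splitOn.go ['|'] fuel l cur acc = acc.reverse ++ consHead cur.reverse (mySplit l) := by
  induction l with
  | nil =>
    intro fuel cur acc _
    cases fuel <;> simp [PySem.Chars.splitOn.go, mySplit, consHead]
  | cons c rest ih =>
    intro fuel cur acc hf
    cases fuel with
    | zero => simp at hf
    | succ n =>
      rw [PySem.Chars.splitOn.go]
      by_cases hc : c = '|'
      · subst hc
        rw [if_pos (by simp [List.isPrefixOf])]
        rw [show List.drop (['|'].length) ('|' :: rest) = rest from rfl]
        rw [ih n [] ((cur.reverse) :: acc) (by simpa using Nat.le_of_succ_le_succ hf)]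
        simp only [mySplit]
        cases h : mySplit rest with
        | nil => exact absurd h (mySplit_ne_nil rest)
        | cons a b => simp [consHead]
      · rw [if_neg (by simp [List.isPrefixOf]; exact fun h => hc h.symm)]
        rw [ih n (c :: cur) acc (by simpa using Nat.le_of_succ_le_succ hf)]
        simp only [mySplit, if_neg hc, List.reverse_cons, consHead_consHead]

theorem splitOn_eq_mySplit (l : List Char) : PySem.Chars.splitOn l ['|'] = mySplit l := by
  unfold PySem.Chars.splitOn
  rw [splitOn_go_eq l (l.length + 1) [] [] (Nat.le_succ _)]
  cases h : mySplit l with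
  | nil => exact absurd h (mySplit_ne_nil l)
  | cons a b => simp [consHead]

theorem mySplit_no_pipe (l : List Char) (h : '|' ∉ l) : mySplit l = [l] := by
  induction l with
  | nil => rfl
  | cons c t ih =>
    have hc : c ≠ '|' := fun hh => h (hh ▸ List.mem_cons_self)
    simp only [mySplit, if_neg hc, ih (fun hm => h (List.mem_cons_of_mem c hm))]
    simp [consHead]

theorem mySplit_pipe (m rest : List Char) (h : '|' ∉ m) :
    mySplit (m ++ '|' :: rest) = m :: mySplit rest := by
  induction m with
  | nil => simp [mySplit]
  | cons c t ih =>
    have hc : c ≠ '|' := fun hh => h (hh ▸ List.mem_cons_self)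
    simp only [List.cons_append, mySplit, if_neg hc, ih (fun hm => h (List.mem_cons_of_mem c hm))]
    simp [consHead]

-- the spec-side loop: first allowed stripped part (chars level)
def partsLoop : List (List Char) → String
  | [] => "unknown"
  | p :: ps =>
    let t := PySem.Chars.strip p
    if PySem.Set.contains INTENTS_ALLOWED_py (String.ofList t) then String.ofList t
    else partsLoop ps

theorem coerceLoopA_eq_partsLoop (ps : List (List Char)) :
    coerceLoopA (ps.map String.ofList) = partsLoop ps := by
  induction ps with
  | nil => rfl
  | cons p rest ih =>
    have hsp : PySem.Str.strip (String.ofList p) = String.ofList (PySem.Chars.strip p) := by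
      apply String.toList_inj.mp
      simp
    simp only [List.map_cons, coerceLoopA, partsLoop, hsp, ih]

-- the state machine consumes one pipe-free, domain segment
theorem scan_seg (m : List Char) : ∀ (token pending k : List Char) (K : String),
    (∀ tok pend, coerceScan (k) tok pend
        = if PySem.Set.contains INTENTS_ALLOWED_py (String.ofList tok) then String.ofList tok else K) →
    (∀ c ∈ m, pvDomChar c = true) → '|' ∉ m →
    (∀ c ∈ pending, PySem.Chars.isspace c = true) → (token = [] → pending = []) →
    coerceScan (m ++ k) token pending =
      (let t := if token = [] then PySem.Chars.strip m
                else token ++ PySem.Chars.rstrip (pending ++ m);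
       if PySem.Set.contains INTENTS_ALLOWED_py (String.ofList t) then String.ofList t else K) := by
  induction m with
  | nil =>
    intro token pending k K hk _ _ hws hinv
    rw [List.nil_append, hk]
    by_cases ht : token = []
    · subst ht
      simp [PySem.Chars.strip, PySem.Chars.lstrip, PySem.Chars.rstrip]
    · simp only [if_neg ht, List.append_nil, rstrip_all_space pending hws, List.append_nil]
  | cons c m' ih =>
    intro token pending k K hk hDom hnp hws hinv
    have hc : c ≠ '|' := fun hh => hnp (hh ▸ List.mem_cons_self)
    have hDom' : ∀ x ∈ m', pvDomChar x = true := fun x hx => hDom x (List.mem_cons_of_mem c hx)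
    have hnp' : '|' ∉ m' := fun hm => hnp (List.mem_cons_of_mem c hm)
    by_cases hwsc : c ∈ pvWS
    · have hcs : PySem.Chars.isspace c = true :=
        (mem_pvWS_iff_isspace c (hDom c List.mem_cons_self)).mp hwsc
      by_cases ht : token = []
      · have hp0 : pending = [] := hinv ht
        subst ht; subst hp0
        rw [List.cons_append, show coerceScan (c :: (m' ++ k)) [] [] = coerceScan (m' ++ k) [] [] by
          simp [coerceScan, hc, hwsc]]
        rw [ih [] [] k K hk hDom' hnp' (by simp) (fun _ => rfl)]
        have hstripc : PySem.Chars.strip (c :: m') = PySem.Chars.strip m' := by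
          simp [PySem.Chars.strip, PySem.Chars.lstrip, hcs]
        simp [hstripc]
      · rw [List.cons_append, show coerceScan (c :: (m' ++ k)) token pending
              = coerceScan (m' ++ k) token (pending ++ [c]) by
            simp [coerceScan, hc, hwsc, ht]]
        rw [ih token (pending ++ [c]) k K hk hDom' hnp'
              (by intro x hx
                  rcases List.mem_append.mp hx with h1 | h1
                  · exact hws x h1
                  · simpa [List.mem_singleton.mp h1] using hcs)
              (fun hh => absurd hh ht)]
        simp only [if_neg ht, List.append_assoc, List.singleton_append]
    · have hcs : PySem.Chars.isspace c = false := by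
        have := (mem_pvWS_iff_isspace c (hDom c List.mem_cons_self)).mpr
        cases h : PySem.Chars.isspace c
        · rfl
        · exact absurd (this h) hwsc
      rw [List.cons_append, show coerceScan (c :: (m' ++ k)) token pending
            = coerceScan (m' ++ k) (token ++ pending ++ [c]) [] by
          simp [coerceScan, hc, hwsc]]
      rw [ih (token ++ pending ++ [c]) [] k K hk hDom' hnp' (by simp)
            (by intro hh; simp at hh)]
      simp only [if_neg (show token ++ pending ++ [c] ≠ [] by simp), List.nil_append]
      by_cases ht : token = []
      · have hp0 : pending = [] := hinv ht
        subst ht; subst hp0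
        have hstripc : PySem.Chars.strip (c :: m') = c :: PySem.Chars.rstrip m' := by
          have hl : PySem.Chars.lstrip (c :: m') = c :: m' := by
            simp [PySem.Chars.lstrip, hcs]
          rw [PySem.Chars.strip, hl]
          simpa using rstrip_append_cons [] c m' hcs
        simp [hstripc]
      · simp [if_neg ht, rstrip_append_cons pending c m' hcs]

theorem scan_main (n : Nat) : ∀ (l : List Char), l.length ≤ n → (∀ c ∈ l, pvDomChar c = true) →
    coerceScan l [] [] = partsLoop (mySplit l) := by
  induction n with
  | zero =>
    intro l hl _
    have : l = [] := List.eq_nil_of_length_eq_zero (Nat.le_zero.mp hl)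
    subst this
    rfl
  | succ n ih =>
    intro l hl hDom
    by_cases hp : '|' ∈ l
    · have hm : '|' ∉ l.takeWhile (fun c => c != '|') := by
        intro hmem
        have := List.mem_takeWhile_imp hmem
        simp at this
      have hd : l.dropWhile (fun c => c != '|') ≠ [] := by
        intro hnil
        rw [List.dropWhile_eq_nil_iff] at hnil
        have := hnil '|' hp
        simp at this
      obtain ⟨c0, rest, hdrop⟩ := List.exists_cons_of_ne_nil hd
      have hc0 : c0 = '|' := by
        have := List.head?_dropWhile_not (fun c => c != '|') l
        rw [hdrop] at this
        simpa using this
      have hsplitl : l = l.takeWhile (fun c => c != '|') ++ '|' :: rest := by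
        conv_lhs => rw [← List.takeWhile_append_dropWhile (p := fun c => c != '|') (l := l)]
        rw [hdrop, hc0]
      have hrestlen : rest.length ≤ n := by
        have := congrArg List.length hsplitl
        simp at this
        omega
      have hrestDom : ∀ c ∈ rest, pvDomChar c = true := by
        intro c hc
        exact hDom c (by rw [hsplitl]; exact List.mem_append_right _ (List.mem_cons_of_mem _ hc))
      have hmDom : ∀ c ∈ l.takeWhile (fun c => c != '|'), pvDomChar c = true :=
        fun c hc => hDom c ((List.takeWhile_sublist _).mem hc)
      rw [hsplitl, mySplit_pipe _ _ hm]
      rw [scan_seg (l.takeWhile (fun c => c != '|')) [] [] ('|' :: rest) (coerceScan rest [] [])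
            (by intro tok pend; simp [coerceScan])
            hmDom hm (by simp) (fun _ => rfl)]
      rw [ih rest hrestlen hrestDom]
      simp [partsLoop]
    · rw [mySplit_no_pipe l hp]
      have := scan_seg l [] [] [] "unknown" (fun tok pend => rfl) hDom hp (by simp) (fun _ => rfl)
      rw [List.append_nil] at this
      rw [this]
      simp [partsLoop]

-- ===== VERDICT (by name: the statement is the Claim_ definition above) =====
theorem coerce_intent_py_spec : Claim_equal_coerce_intent_py := by
  intro raw hDom
  unfold Spec_coerce_intent_py coerce_intent_py coerce_intent_py_alt
  set s := PySem.Str.strip (raw.getD "unknown") with hs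
  have hbaseDom : ∀ c ∈ (raw.getD "unknown").toList, pvDomChar c = true := by
    cases raw with
    | none =>
      intro c hc
      have he : ((none : Option String).getD "unknown").toList = ['u','n','k','n','o','w','n'] := rfl
      rw [he] at hc
      simp at hc
      rcases hc with h1|h1|h1|h1|h1|h1|h1 <;> subst h1 <;> decide
    | some t =>
      intro c hc
      simp only [Dom_coerce_intent_py, Option.map_some, Option.getD_some, pvDomStr] at hDom
      exact List.all_eq_true.mp hDom c hc
  have hsDom : ∀ c ∈ s.toList, pvDomChar c = true := by
    intro c hc
    rw [hs, PySem.Str.toList_strip] at hc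
    exact hbaseDom c (mem_of_mem_strip _ c hc)
  have hscan : coerceScan s.toList [] [] = partsLoop (mySplit s.toList) :=
    scan_main s.toList.length s.toList le_rfl hsDom
  rw [hscan]
  by_cases hpipe : PySem.Str.isIn "|" s = true
  · rw [if_pos hpipe]
    have hsplit : PySem.Str.split? s "|" = some ((mySplit s.toList).map String.ofList) := by
      unfold PySem.Str.split?
      simp [PySem.Chars.split?, splitOn_eq_mySplit]
    rw [hsplit]
    simp only [Option.getD_some]
    rw [coerceLoopA_eq_partsLoop]
  · rw [if_neg hpipe]
    have hmem : '|' ∉ s.toList := by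
      intro hm
      apply hpipe
      rw [PySem.Str.isIn]
      apply (PySem.Chars.isIn_iff_infix _ _).mpr
      rcases List.mem_iff_append.mp hm with ⟨u, v, huv⟩
      exact ⟨u, v, by simp [huv]⟩
    rw [mySplit_no_pipe _ hmem]
    have hstrips : PySem.Chars.strip s.toList = s.toList := by
      rw [hs, PySem.Str.toList_strip, chars_strip_idem]
    simp only [partsLoop, hstrips, String.ofList_toList]
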